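-- pv_equiv track=rewrite | github.com/eveline-hutter/advent-of-code-2021 | day4/main.py | calculate_unmarked_nrs
-- ===== SOURCE A (Python) =====
-- def calculate_unmarked_nrs(sheet):
--     unmarked_nrs = 0
--     for i in range(len(sheet)):
--         for j in range(len(sheet[i])):
--             nr = sheet[i][j]
--             if nr != -1:
--                 unmarked_nrs += nr
--     return unmarked_nrs
-- ===== SOURCE B (Python) =====
-- def calculate_unmarked_nrs(sheet):
--     total = sum(sum(row) for row in sheet)
--     marked = sum(row.count(-1) for row in sheet)
--     return total + marked
-- ===== Notes on version B (the rewrite author's own statement) =====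
-- stated objective: idiomatic
-- what changed: Instead of scanning cell-by-cell with index loops and a branch on -1, B sums every cell unconditionally and adds back one per cell equal to -1 (each marked cell contributes exactly -1 to the raw total).
import Mathlib
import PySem

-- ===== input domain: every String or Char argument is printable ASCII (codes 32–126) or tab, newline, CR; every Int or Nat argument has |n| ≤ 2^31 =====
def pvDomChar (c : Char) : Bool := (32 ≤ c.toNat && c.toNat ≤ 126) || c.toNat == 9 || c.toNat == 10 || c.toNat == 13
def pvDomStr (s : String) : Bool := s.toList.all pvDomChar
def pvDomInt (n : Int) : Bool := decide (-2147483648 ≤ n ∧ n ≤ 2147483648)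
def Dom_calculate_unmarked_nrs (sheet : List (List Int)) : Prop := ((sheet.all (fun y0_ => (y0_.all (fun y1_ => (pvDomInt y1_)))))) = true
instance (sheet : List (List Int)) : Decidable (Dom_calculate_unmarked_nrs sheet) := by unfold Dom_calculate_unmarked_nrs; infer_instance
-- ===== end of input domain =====

-- B sums every cell unconditionally and adds back one per cell equal to -1, instead of A's guarded cell-by-cell index loops; same cost (return value only; no mutation).

-- ===== PORT A =====
def calculate_unmarked_nrs (sheet : List (List Int)) : Int :=
  (PySem.List.pyRange 0 sheet.length 1).foldl (fun unmarked_nrs i =>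
    let row := PySem.List.pyGetD sheet i []
    (PySem.List.pyRange 0 row.length 1).foldl (fun acc j =>
      let nr := PySem.List.pyGetD row j 0
      if nr ≠ -1 then acc + nr else acc) unmarked_nrs) 0

-- ===== PORT B =====
def calculate_unmarked_nrs_alt (sheet : List (List Int)) : Int :=
  (sheet.map (fun row => row.sum)).sum
    + (sheet.map (fun row => (PySem.List.count row (-1) : Int))).sum

-- ===== PRECONDITION & SPEC =====
def Spec_calculate_unmarked_nrs (sheet : List (List Int)) (out : Int) : Prop := out = calculate_unmarked_nrs_alt sheet
instance (sheet : List (List Int)) (out : Int) : Decidable (Spec_calculate_unmarked_nrs sheet out) := by unfold Spec_calculate_unmarked_nrs; infer_instance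

-- ===== CLAIM (what is proved, stated in full; the proofs are below) =====
def Claim_equal_calculate_unmarked_nrs : Prop := ∀ (sheet : List (List Int)), Dom_calculate_unmarked_nrs sheet → Spec_calculate_unmarked_nrs sheet (calculate_unmarked_nrs sheet)

-- ===== LEMMAS AND PROOFS =====

-- inner row loop of A = raw sum plus the count of -1 cells
theorem row_loop_eq (row : List Int) (acc : Int) :
    row.foldl (fun a nr => if nr ≠ -1 then a + nr else a) acc
      = acc + row.sum + (PySem.List.count row (-1) : Int) := by
  induction row generalizing acc with
  | nil => simp [PySem.List.count]
  | cons x xs ih =>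
    simp only [List.foldl_cons, List.sum_cons, ih]
    by_cases hx : x = -1
    · subst hx; simp [PySem.List.count]; ring
    · rw [if_pos (by exact hx)]
      simp [PySem.List.count, hx]
      ring

theorem outer_loop_eq (sheet : List (List Int)) (acc : Int) :
    sheet.foldl (fun unmarked_nrs row =>
        row.foldl (fun a nr => if nr ≠ -1 then a + nr else a) unmarked_nrs) acc
      = acc + (sheet.map (fun row => row.sum)).sum
            + (sheet.map (fun row => (PySem.List.count row (-1) : Int))).sum := by
  induction sheet generalizing acc with
  | nil => simp
  | cons r rs ih =>
    rw [List.foldl_cons, row_loop_eq, ih]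
    simp only [List.map_cons, List.sum_cons]
    ring

-- ===== VERDICT (by name: the statement is the Claim_ definition above) =====
theorem calculate_unmarked_nrs_spec : Claim_equal_calculate_unmarked_nrs := by
  intro sheet _
  show calculate_unmarked_nrs sheet = calculate_unmarked_nrs_alt sheet
  unfold calculate_unmarked_nrs calculate_unmarked_nrs_alt
  have hinner : ∀ (row : List Int) (acc : Int),
      List.foldl (fun a j => if PySem.List.pyGetD row j 0 ≠ -1 then a + PySem.List.pyGetD row j 0 else a)
          acc (PySem.List.pyRange 0 (row.length : Int))
        = row.foldl (fun a nr => if nr ≠ -1 then a + nr else a) acc := fun row acc =>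
    PySem.List.foldl_pyRange_zero_pyGetD' row 0 (fun a nr => if nr ≠ -1 then a + nr else a) acc
  simp only [hinner]
  rw [PySem.List.foldl_pyRange_zero_pyGetD' sheet []
      (fun unmarked_nrs row => row.foldl (fun a nr => if nr ≠ -1 then a + nr else a) unmarked_nrs) 0]
  rw [outer_loop_eq]
  ring
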